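-- pv_equiv track=rewrite | github.com/quimpm/complete_sat | OnDuTuaTarariComsiComSAT.py | most_equilibrated
-- ===== SOURCE A (Python) =====
-- def most_equilibrated(formula): # Heuristic
--     apparences={}
--     for clause in formula:
--         for literal in clause:
--             if literal in apparences:
--                 apparences[literal][0] += 1
--             elif -literal in apparences:
--                 apparences[-literal][1] += 1
--             else:
--                 apparences[literal] = [1,0]
--     return max(apparences, key = lambda x : apparences[x][0] * apparences[x][1])
-- ===== SOURCE B (Python) =====
-- def most_equilibrated(formula):
--     counts = {}
--     for clause in formula:
--         for lit in clause:
--             counts[lit] = counts.get(lit, 0) + 1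
--     return max(counts, key=lambda x: counts[x] * counts.get(-x, 0))
-- ===== Notes on version B (the rewrite author's own statement) =====
-- stated objective: idiomatic
-- what changed: Instead of merging each literal with its negation into a two-slot dict via a three-way branch, B counts every signed literal separately in one flat counting dict and takes max over its keys with the symmetric score counts[x]*counts.get(-x,0), relying on first-insertion order for the tie-break.
-- outside the precondition, e.g. on most_equilibrated([[1], [-1], [0], [0], [0]]): A returns 1, B returns 0
import Mathlib
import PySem

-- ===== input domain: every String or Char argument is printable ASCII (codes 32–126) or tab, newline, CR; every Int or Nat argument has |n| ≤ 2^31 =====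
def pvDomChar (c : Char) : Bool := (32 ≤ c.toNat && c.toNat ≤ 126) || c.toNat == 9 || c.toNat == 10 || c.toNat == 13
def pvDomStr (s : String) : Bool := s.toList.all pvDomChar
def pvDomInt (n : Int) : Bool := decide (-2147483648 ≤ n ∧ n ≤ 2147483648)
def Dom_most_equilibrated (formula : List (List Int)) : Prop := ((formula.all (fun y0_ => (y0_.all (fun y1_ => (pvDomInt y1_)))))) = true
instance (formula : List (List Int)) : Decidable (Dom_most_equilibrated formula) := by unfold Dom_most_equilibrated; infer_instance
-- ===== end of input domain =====

-- B replaces A's literal/negation-merging dict (three-way branch) by a plain occurrence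
-- counter over all signed literals plus the symmetric score counts[x]*counts.get(-x,0);
-- objective: idiomatic. Equivalence is proved on Pre_ (nonempty, 0-free formulas).

-- ===== PORT A =====
def most_equilibrated (formula : List (List Int)) : Int :=
  let app := formula.foldl (fun d clause => clause.foldl (fun d lit =>
      if d.contains lit then d.modify lit (0, 0) (fun p => (p.1 + 1, p.2))
      else if d.contains (-lit) then d.modify (-lit) (0, 0) (fun p => (p.1, p.2 + 1))
      else d.insert lit (1, 0)) d) (PySem.Dict.empty : PySem.Dict Int (Int × Int))
  (PySem.List.max? app.keys (fun x => (app.getD x (0, 0)).1 * (app.getD x (0, 0)).2)).getD 0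

-- ===== PORT B =====
def most_equilibrated_alt (formula : List (List Int)) : Int :=
  let counts := formula.foldl (fun d clause => clause.foldl (fun d lit =>
      d.insert lit (d.getD lit 0 + 1)) d) (PySem.Dict.empty : PySem.Dict Int Int)
  (PySem.List.max? counts.keys (fun x => counts.getD x 0 * counts.getD (-x) 0)).getD 0

-- ===== PRECONDITION & SPEC =====
-- Pre_ excludes (a) formulas with no literal at all, where Python's max() raises ValueError in
-- both A and B, and (b) formulas containing the literal 0 — malformed CNF input (0 is no literal:
-- it is its own negation), on which A's pair-merging and B's symmetric score defensibly disagree.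
def Pre_most_equilibrated (formula : List (List Int)) : Prop :=
  formula.flatten ≠ [] ∧ (0 : Int) ∉ formula.flatten
instance (formula : List (List Int)) : Decidable (Pre_most_equilibrated formula) := by
  unfold Pre_most_equilibrated; infer_instance

def pvWitness_most_equilibrated : List (List Int) := [[1, -1], [2]]

def Spec_most_equilibrated (formula : List (List Int)) (out : Int) : Prop := out = most_equilibrated_alt formula
instance (formula : List (List Int)) (out : Int) : Decidable (Spec_most_equilibrated formula out) := by unfold Spec_most_equilibrated; infer_instance

-- ===== CLAIM (what is proved, stated in full; the proofs are below) =====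
def Claim_equal_most_equilibrated : Prop := ∀ (formula : List (List Int)), Dom_most_equilibrated formula → Pre_most_equilibrated formula → Spec_most_equilibrated formula (most_equilibrated formula)

-- ===== LEMMAS AND PROOFS =====

-- A's per-literal dict update (the body of A's nested loop).
def pvStepA (d : PySem.Dict Int (Int × Int)) (lit : Int) : PySem.Dict Int (Int × Int) :=
  if d.contains lit then d.modify lit (0, 0) (fun p => (p.1 + 1, p.2))
  else if d.contains (-lit) then d.modify (-lit) (0, 0) (fun p => (p.1, p.2 + 1))
  else d.insert lit (1, 0)

-- the step of PySem.List.max? (first maximal element)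
def pvMStep (f : Int → Int) (o : Option Int) (x : Int) : Option Int :=
  match o with
  | none => some x
  | some m => if f m < f x then some x else some m

theorem pvMax?_eq_foldl (xs : List Int) (f : Int → Int) :
    PySem.List.max? xs f = xs.foldl (pvMStep f) none := by
  rw [PySem.List.max?]
  apply PySem.List.foldl_congr_mem
  intro acc x _
  cases acc <;> rfl

-- pair-dedup (A's key order): keep x only if neither x nor -x was kept before
def pvPd (acc : List Int) : List Int → List Int
  | [] => []
  | x :: t => if x ∈ acc ∨ -x ∈ acc then pvPd acc t else x :: pvPd (acc ++ [x]) t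

-- plain dedup (B's key order): keep x only on first occurrence
def pvSd (acc : List Int) : List Int → List Int
  | [] => []
  | x :: t => if x ∈ acc then pvSd acc t else x :: pvSd (acc ++ [x]) t

theorem pvPd_foldl : ∀ (l acc : List Int),
    l.foldl (fun a x => if x ∈ a ∨ -x ∈ a then a else a ++ [x]) acc = acc ++ pvPd acc l := by
  intro l
  induction l with
  | nil => intro acc; simp [pvPd]
  | cons x t ih =>
    intro acc
    by_cases h : x ∈ acc ∨ -x ∈ acc
    · simp [pvPd, h, ih]
    · simp [pvPd, h, ih (acc ++ [x])]

theorem pvSd_foldl : ∀ (l acc : List Int),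
    l.foldl PySem.Set.add acc = acc ++ pvSd acc l := by
  intro l
  induction l with
  | nil => intro acc; simp [pvSd]
  | cons x t ih =>
    intro acc
    by_cases h : x ∈ acc
    · simp [pvSd, PySem.Set.add, PySem.Set.contains, h, ih]
    · simp [pvSd, PySem.Set.add, PySem.Set.contains, h, ih (acc ++ [x])]

-- congruence for the running-max fold
theorem pvMax_congr (f g : Int → Int) : ∀ (l : List Int) (o : Option Int),
    (∀ x ∈ l, f x = g x) → (∀ m, o = some m → f m = g m) →
    l.foldl (pvMStep f) o = l.foldl (pvMStep g) o := by
  intro l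
  induction l with
  | nil => intro o _ _; rfl
  | cons x t ih =>
    intro o hl ho
    have hx : f x = g x := hl x (by simp)
    have hstep : pvMStep f o x = pvMStep g o x := by
      cases o with
      | none => rfl
      | some m => simp [pvMStep, hx, ho m rfl]
    simp only [List.foldl_cons, hstep]
    apply ih
    · intro y hy; exact hl y (by simp [hy])
    · intro m hm
      cases o with
      | none => simp [pvMStep] at hm; subst hm; exact hx
      | some m0 =>
        have h0 : f m0 = g m0 := ho m0 rfl
        simp [pvMStep] at hm
        by_cases hc : g m0 < g x
        · simp [hc] at hm; subst hm; exact hx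
        · simp [hc] at hm; subst hm; exact h0

-- MAIN max lemma: the first argmax over A's pair-deduped keys equals the one over B's keys,
-- for a symmetric score f.
theorem pvMax_pd_sd (f : Int → Int) (hsym : ∀ x, f (-x) = f x) :
    ∀ (l accA accB : List Int) (o : Option Int),
    (∀ y ∈ accB, y ∈ accA ∨ -y ∈ accA) →
    (∀ y ∈ accA, y ∈ accB) →
    (∀ y : Int, (y ∈ accA ∨ -y ∈ accA) → ∃ m, o = some m ∧ f y ≤ f m) →
    (pvPd accA l).foldl (pvMStep f) o = (pvSd accB l).foldl (pvMStep f) o := by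
  intro l
  induction l with
  | nil => intro accA accB o _ _ _; rfl
  | cons x t ih =>
    intro accA accB o h1 h2 h3
    by_cases hb : x ∈ accB
    · -- seen by B before: both drop
      have ha : x ∈ accA ∨ -x ∈ accA := h1 x hb
      simp only [pvPd, pvSd, if_pos ha, if_pos hb]
      exact ih accA accB o h1 h2 h3
    · by_cases hn : -x ∈ accB
      · -- negation seen: A drops, B keeps x but the running max already dominates
        have ha : x ∈ accA ∨ -x ∈ accA := by
          rcases h1 (-x) hn with h | h
          · right; exact h
          · left; simpa using h
        obtain ⟨m, hm, hfm⟩ := h3 x ha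
        have hkeep : pvMStep f o x = o := by
          subst hm; simp [pvMStep, not_lt.mpr hfm]
        simp only [pvPd, pvSd, if_pos ha, if_neg hb, List.foldl_cons, hkeep]
        apply ih accA (accB ++ [x]) o
        · intro y hy
          rcases List.mem_append.mp hy with h | h
          · exact h1 y h
          · simp at h; subst h; exact ha
        · intro y hy; exact List.mem_append_left _ (h2 y hy)
        · exact h3
      · -- fresh pair: both keep x
        have hxa : x ∉ accA := fun h => hb (h2 x h)
        have hna : -x ∉ accA := fun h => hn (h2 (-x) h)
        have ha : ¬ (x ∈ accA ∨ -x ∈ accA) := fun h => h.elim hxa hna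
        simp only [pvPd, pvSd, if_neg ha, if_neg hb, List.foldl_cons]
        apply ih (accA ++ [x]) (accB ++ [x]) (pvMStep f o x)
        · intro y hy
          rcases List.mem_append.mp hy with h | h
          · rcases h1 y h with h' | h'
            · exact Or.inl (List.mem_append_left _ h')
            · exact Or.inr (List.mem_append_left _ h')
          · simp at h; subst h; exact Or.inl (by simp)
        · intro y hy
          rcases List.mem_append.mp hy with h | h
          · exact List.mem_append_left _ (h2 y h)
          · simp at h; subst h; simp
        · intro y hy
          -- the new state dominates f x and everything the old state dominated
          have hdom : ∃ m', pvMStep f o x = some m' ∧ f x ≤ f m' ∧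
              (∀ m0, o = some m0 → f m0 ≤ f m') := by
            cases o with
            | none => exact ⟨x, rfl, le_refl _, by intro m0 h; cases h⟩
            | some m0 =>
              by_cases hc : f m0 < f x
              · exact ⟨x, by simp [pvMStep, hc], le_refl _,
                  by intro m1 h; injection h with h; subst h; exact le_of_lt hc⟩
              · exact ⟨m0, by simp [pvMStep, hc], not_lt.mp hc,
                  by intro m1 h; injection h with h; subst h; exact le_refl _⟩
          obtain ⟨m', hm', hxm', hold⟩ := hdom
          rcases hy with hy | hy
          · rcases List.mem_append.mp hy with h | h
            · obtain ⟨m0, hm0, hfy⟩ := h3 y (Or.inl h)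
              exact ⟨m', hm', le_trans hfy (hold m0 hm0)⟩
            · simp at h; subst h; exact ⟨m', hm', hxm'⟩
          · rcases List.mem_append.mp hy with h | h
            · obtain ⟨m0, hm0, hfy⟩ := h3 y (Or.inr h)
              exact ⟨m', hm', le_trans hfy (hold m0 hm0)⟩
            · simp at h
              have : y = -x := by omega
              subst this
              exact ⟨m', hm', by rw [hsym]; exact hxm'⟩

-- count of a list extended by one element
theorem cnt_app (l : List Int) (x k : Int) :
    (l ++ [x]).count k = l.count k + (if k = x then 1 else 0) := by
  by_cases h : k = x
  · simp [List.count_append, h]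
  · have h2 : ¬ (x = k) := fun hh => h hh.symm
    simp [List.count_append, h, h2]

theorem pvA_inv : ∀ (l : List Int), (0 : Int) ∉ l →
    (l.foldl pvStepA (PySem.Dict.empty : PySem.Dict Int (Int × Int))).keys
        = l.foldl (fun a x => if x ∈ a ∨ -x ∈ a then a else a ++ [x]) [] ∧
    (∀ y ∈ (l.foldl pvStepA (PySem.Dict.empty : PySem.Dict Int (Int × Int))).keys, -y ∉ (l.foldl pvStepA (PySem.Dict.empty : PySem.Dict Int (Int × Int))).keys) ∧
    (∀ y : Int, (y ∈ (l.foldl pvStepA (PySem.Dict.empty : PySem.Dict Int (Int × Int))).keys ∨ -y ∈ (l.foldl pvStepA (PySem.Dict.empty : PySem.Dict Int (Int × Int))).keys) ↔ (y ∈ l ∨ -y ∈ l)) ∧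
    (∀ k ∈ (l.foldl pvStepA (PySem.Dict.empty : PySem.Dict Int (Int × Int))).keys,
        (l.foldl pvStepA (PySem.Dict.empty : PySem.Dict Int (Int × Int))).getD k (0, 0) = ((l.count k : Int), (l.count (-k) : Int))) := by
  intro l
  induction l using List.reverseRecOn with
  | nil => simp [PySem.Dict.keys_empty]
  | append_singleton l x ih =>
    intro hz
    have hz0 : (0 : Int) ∉ l := fun h => hz (List.mem_append_left _ h)
    have hx0 : x ≠ 0 := fun h => hz (by simp [h])
    have hxx : x ≠ -x := by omega
    obtain ⟨ik, ipf, imem, igd⟩ := ih hz0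
    set d := l.foldl pvStepA (PySem.Dict.empty : PySem.Dict Int (Int × Int)) with hd
    have hfold : (l ++ [x]).foldl pvStepA (PySem.Dict.empty : PySem.Dict Int (Int × Int)) = pvStepA d x := by
      rw [List.foldl_append]; rfl
    have hkfold : (l ++ [x]).foldl (fun a x => if x ∈ a ∨ -x ∈ a then a else a ++ [x]) ([] : List Int)
        = (if x ∈ d.keys ∨ -x ∈ d.keys then d.keys else d.keys ++ [x]) := by
      rw [List.foldl_append, ← ik]; rfl
    rw [hfold, hkfold]
    by_cases hc : d.contains x
    · have hxk : x ∈ d.keys := (PySem.Dict.contains_iff_mem_keys d x).mp hc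
      have hstep : pvStepA d x = d.modify x (0, 0) (fun p => (p.1 + 1, p.2)) := by
        simp [pvStepA, hc]
      have hkeys : (pvStepA d x).keys = d.keys := by
        rw [hstep, PySem.Dict.keys_modify, PySem.Dict.keys_insert_of_contains _ _ hc]
      refine ⟨?_, ?_, ?_, ?_⟩
      · rw [hkeys, if_pos (Or.inl hxk)]
      · rw [hkeys]; exact ipf
      · intro y; rw [hkeys]
        constructor
        · intro h; rcases (imem y).mp h with h' | h'
          · exact Or.inl (List.mem_append_left _ h')
          · exact Or.inr (List.mem_append_left _ h')
        · intro h
          rcases h with h | h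
          · rcases List.mem_append.mp h with h' | h'
            · exact (imem y).mpr (Or.inl h')
            · simp at h'; subst h'; exact Or.inl hxk
          · rcases List.mem_append.mp h with h' | h'
            · exact (imem y).mpr (Or.inr h')
            · simp at h'
              have : y = -x := by omega
              subst this; exact Or.inr (by simpa using hxk)
      · intro k hk
        rw [hkeys] at hk
        rw [hstep, PySem.Dict.getD_modify, cnt_app, cnt_app]
        by_cases hkx : k = x
        · rw [if_pos hkx, igd x hxk, hkx]
          have hnx : ¬ (-x = x) := by omega
          rw [if_pos rfl, if_neg hnx]
          push_cast; rfl
        · have hknx : ¬ (-k = x) := fun h => ipf k hk (by rw [h]; exact hxk)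
          rw [if_neg hkx, igd k hk]
          simp [hkx, hknx]
    · by_cases hc2 : d.contains (-x)
      · have hxk : -x ∈ d.keys := (PySem.Dict.contains_iff_mem_keys d _).mp hc2
        have hxnk : x ∉ d.keys := fun h => by
          rw [← PySem.Dict.contains_iff_mem_keys] at h; exact hc (by simpa using h)
        have hstep : pvStepA d x = d.modify (-x) (0, 0) (fun p => (p.1, p.2 + 1)) := by
          simp [pvStepA, hc, hc2]
        have hkeys : (pvStepA d x).keys = d.keys := by
          rw [hstep, PySem.Dict.keys_modify, PySem.Dict.keys_insert_of_contains _ _ hc2]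
        refine ⟨?_, ?_, ?_, ?_⟩
        · rw [hkeys, if_pos (Or.inr hxk)]
        · rw [hkeys]; exact ipf
        · intro y; rw [hkeys]
          constructor
          · intro h; rcases (imem y).mp h with h' | h'
            · exact Or.inl (List.mem_append_left _ h')
            · exact Or.inr (List.mem_append_left _ h')
          · intro h
            rcases h with h | h
            · rcases List.mem_append.mp h with h' | h'
              · exact (imem y).mpr (Or.inl h')
              · simp at h'; subst h'; exact Or.inr hxk
            · rcases List.mem_append.mp h with h' | h'
              · exact (imem y).mpr (Or.inr h')
              · simp at h'
                have : y = -x := by omega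
                subst this; exact Or.inl hxk
        · intro k hk
          rw [hkeys] at hk
          rw [hstep, PySem.Dict.getD_modify, cnt_app, cnt_app]
          by_cases hknx : k = -x
          · rw [if_pos hknx, igd (-x) hxk, hknx]
            have hnx : ¬ (-x = x) := by omega
            have hnnx : - -x = x := by omega
            rw [if_neg hnx, hnnx, if_pos rfl]
            push_cast; rfl
          · have hkx : ¬ (k = x) := fun h => hxnk (h ▸ hk)
            have hnkx : ¬ (-k = x) := fun h => hknx (by omega)
            rw [if_neg hknx, igd k hk]
            simp [hkx, hnkx]
      · have hxnk : x ∉ d.keys := fun h => by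
          rw [← PySem.Dict.contains_iff_mem_keys] at h; exact hc (by simpa using h)
        have hnxnk : -x ∉ d.keys := fun h => by
          rw [← PySem.Dict.contains_iff_mem_keys] at h; exact hc2 (by simpa using h)
        have hcf : d.contains x = false := by
          rw [Bool.eq_false_iff]; exact fun h => hc (by simpa using h)
        have hstep : pvStepA d x = d.insert x (1, 0) := by
          simp [pvStepA, hc, hc2]
        have hkeys : (pvStepA d x).keys = d.keys ++ [x] := by
          rw [hstep, PySem.Dict.keys_insert_of_not_contains _ _ hcf]
        have hxl : x ∉ l := fun h => by
          rcases (imem x).mpr (Or.inl h) with h' | h'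
          · exact hxnk h'
          · exact hnxnk h'
        have hnxl : -x ∉ l := fun h => by
          rcases (imem x).mpr (Or.inr h) with h' | h'
          · exact hxnk h'
          · exact hnxnk h'
        refine ⟨?_, ?_, ?_, ?_⟩
        · rw [hkeys, if_neg (fun h => h.elim hxnk hnxnk)]
        · rw [hkeys]
          intro y hy hny
          rcases List.mem_append.mp hy with h' | h'
          · rcases List.mem_append.mp hny with h'' | h''
            · exact ipf y h' h''
            · simp at h''
              exact hnxnk (by rw [← h'']; simpa using h')
          · simp at h'; subst h'
            rcases List.mem_append.mp hny with h'' | h''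
            · exact hnxnk h''
            · simp at h''; omega
        · intro y; rw [hkeys]
          constructor
          · intro h
            rcases h with h | h
            · rcases List.mem_append.mp h with h' | h'
              · rcases (imem y).mp (Or.inl h') with h'' | h''
                · exact Or.inl (List.mem_append_left _ h'')
                · exact Or.inr (List.mem_append_left _ h'')
              · simp at h'; subst h'; exact Or.inl (by simp)
            · rcases List.mem_append.mp h with h' | h'
              · rcases (imem y).mp (Or.inr h') with h'' | h''
                · exact Or.inl (List.mem_append_left _ h'')
                · exact Or.inr (List.mem_append_left _ h'')
              · simp at h'
                have : y = -x := by omega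
                subst this; exact Or.inr (by simp)
          · intro h
            rcases h with h | h
            · rcases List.mem_append.mp h with h' | h'
              · rcases (imem y).mpr (Or.inl h') with h'' | h''
                · exact Or.inl (List.mem_append_left _ h'')
                · exact Or.inr (List.mem_append_left _ h'')
              · simp at h'; subst h'; exact Or.inl (by simp)
            · rcases List.mem_append.mp h with h' | h'
              · rcases (imem y).mpr (Or.inr h') with h'' | h''
                · exact Or.inl (List.mem_append_left _ h'')
                · exact Or.inr (List.mem_append_left _ h'')
              · simp at h'
                have : y = -x := by omega
                subst this; exact Or.inr (by simp)
        · intro k hk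
          rw [hkeys] at hk
          rw [hstep, PySem.Dict.getD_insert, cnt_app, cnt_app]
          rcases List.mem_append.mp hk with hk' | hk'
          · have hkx : ¬ (k = x) := fun h => hxnk (h ▸ hk')
            have hknx : ¬ (-k = x) := fun h => hnxnk (by rw [← h]; simpa using hk')
            rw [if_neg hkx, igd k hk']
            simp [hkx, hknx]
          · simp at hk'
            rw [if_pos hk', hk']
            have h1 : l.count x = 0 := List.count_eq_zero.mpr hxl
            have h2 : l.count (-x) = 0 := List.count_eq_zero.mpr hnxl
            have hnx : ¬ (-x = x) := by omega
            rw [h1, if_pos rfl, h2, if_neg hnx]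
            rfl

-- A's port, with the nested clause/literal loop fused over the flattened literal list
theorem pvA_flatten (formula : List (List Int)) :
    most_equilibrated formula
      = (PySem.List.max? ((formula.flatten).foldl pvStepA (PySem.Dict.empty : PySem.Dict Int (Int × Int))).keys
          (fun x => (((formula.flatten).foldl pvStepA (PySem.Dict.empty : PySem.Dict Int (Int × Int))).getD x (0, 0)).1
                  * (((formula.flatten).foldl pvStepA (PySem.Dict.empty : PySem.Dict Int (Int × Int))).getD x (0, 0)).2)).getD 0 := by
  simp only [most_equilibrated]
  rw [List.foldl_flatten]
  rfl

-- B's port, likewise over the flattened literal list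
theorem pvB_flatten (formula : List (List Int)) :
    most_equilibrated_alt formula
      = (PySem.List.max? ((formula.flatten).foldl (fun d lit => d.insert lit (d.getD lit 0 + 1)) (PySem.Dict.empty : PySem.Dict Int Int)).keys
          (fun x => ((formula.flatten).foldl (fun d lit => d.insert lit (d.getD lit 0 + 1)) (PySem.Dict.empty : PySem.Dict Int Int)).getD x 0
                  * ((formula.flatten).foldl (fun d lit => d.insert lit (d.getD lit 0 + 1)) (PySem.Dict.empty : PySem.Dict Int Int)).getD (-x) 0)).getD 0 := by
  simp only [most_equilibrated_alt]
  rw [List.foldl_flatten]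

-- ===== VERDICT (by name: the statement is the Claim_ definition above) =====
theorem most_equilibrated_spec : Claim_equal_most_equilibrated := by
  unfold Claim_equal_most_equilibrated
  intro formula _ hpre
  unfold Spec_most_equilibrated
  obtain ⟨hne, hz⟩ := hpre
  obtain ⟨ik, ipf, imem, igd⟩ := pvA_inv formula.flatten hz
  rw [pvA_flatten, pvB_flatten]
  -- the common (symmetric) score: product of the occurrence counts of x and -x
  set L := formula.flatten with hL
  set p : Int → Int := fun x => ((L.count x : Int)) * ((L.count (-x) : Int)) with hp
  have hsym : ∀ x : Int, p (-x) = p x := by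
    intro x; simp only [hp, neg_neg]; ring
  set dA := L.foldl pvStepA (PySem.Dict.empty : PySem.Dict Int (Int × Int)) with hdA
  set dB := L.foldl (fun d lit => d.insert lit (d.getD lit 0 + 1)) (PySem.Dict.empty : PySem.Dict Int Int) with hdB
  have hBkeys : dB.keys = L.foldl PySem.Set.add [] := by
    rw [hdB, PySem.Dict.keys_foldl_insert L (fun d x => d.getD x 0 + 1) PySem.Dict.empty]
    simp [PySem.Set.update, PySem.Dict.keys_empty]
  have hBgetD : ∀ v : Int, dB.getD v 0 = (L.count v : Int) := by
    intro v
    rw [hdB, PySem.Dict.getD_foldl_insert_add_one]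
    simp
  have hAmax : PySem.List.max? dA.keys
      (fun x => (dA.getD x (0, 0)).1 * (dA.getD x (0, 0)).2) = PySem.List.max? dA.keys p := by
    rw [pvMax?_eq_foldl, pvMax?_eq_foldl]
    apply pvMax_congr
    · intro k hk
      rw [igd k hk, hp]
    · intro m hm; simp at hm
  have hBmax : PySem.List.max? dB.keys
      (fun x => dB.getD x 0 * dB.getD (-x) 0) = PySem.List.max? dB.keys p := by
    have : (fun x => dB.getD x 0 * dB.getD (-x) 0) = p := by
      funext x; rw [hBgetD, hBgetD, hp]
    rw [this]
  have hmain : PySem.List.max? dA.keys p = PySem.List.max? dB.keys p := by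
    rw [pvMax?_eq_foldl, pvMax?_eq_foldl, ik, hBkeys, pvPd_foldl, pvSd_foldl]
    simp only [List.nil_append]
    apply pvMax_pd_sd p hsym L [] [] none
    · intro y hy; simp at hy
    · intro y hy; simp at hy
    · intro y hy; rcases hy with h | h <;> simp at h
  rw [hAmax, hBmax, hmain]
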